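-- pv_equiv track=rewrite | github.com/jain18aditya/PracticeDSA | extra/min_removal_with_one_modification.py | min_removals_with_one_edit
-- ===== SOURCE A (Python) =====
-- def min_removals_with_one_edit(arr):
--     arr.sort()
--     n = len(arr)
--
--     j = 0
--     max_keep = 0
--
--     for i in range(n):
--         while j < n and arr[j] <= 2 * arr[i]:
--             j += 1
--
--         length = j - i
--
--         # case 1: no modification
--         max_keep = max(max_keep, length)
--
--         # case 2: allow one modification
--         if j < n:
--             max_keep = max(max_keep, length + 1)
--
--     return n - max_keep
-- ===== SOURCE B (Python) =====
-- def min_removals_with_one_edit(arr):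
--     # Per-element binary search (bisect_right by hand) instead of A's
--     # monotonic two-pointer sweep.  Sorts arr in place, like A.
--     arr.sort()
--     n = len(arr)
--     max_keep = 0
--     for i in range(n):
--         x = 2 * arr[i]
--         lo, hi = 0, n
--         while lo < hi:
--             mid = (lo + hi) // 2
--             if arr[mid] <= x:
--                 lo = mid + 1
--             else:
--                 hi = mid
--         length = lo - i
--         max_keep = max(max_keep, length)
--         if lo < n:
--             max_keep = max(max_keep, length + 1)
--     return n - max_keep
-- ===== Notes on version B (the rewrite author's own statement) =====
-- stated objective: alternative
-- what changed: Replaces A's stateful monotonic two-pointer sweep with an independent per-element binary search (hand-written bisect_right) into the sorted array; the cross-iteration pointer state disappears.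
import Mathlib
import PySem

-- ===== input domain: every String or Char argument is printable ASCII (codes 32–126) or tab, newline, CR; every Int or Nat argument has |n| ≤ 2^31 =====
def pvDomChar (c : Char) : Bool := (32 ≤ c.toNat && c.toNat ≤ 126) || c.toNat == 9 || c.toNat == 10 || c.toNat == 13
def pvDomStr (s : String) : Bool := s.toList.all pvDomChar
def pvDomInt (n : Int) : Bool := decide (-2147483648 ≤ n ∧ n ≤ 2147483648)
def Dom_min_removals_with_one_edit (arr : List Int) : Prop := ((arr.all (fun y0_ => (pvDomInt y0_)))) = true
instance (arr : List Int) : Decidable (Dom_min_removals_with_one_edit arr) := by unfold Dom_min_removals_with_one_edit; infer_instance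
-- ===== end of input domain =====

-- B replaces A's two-pointer sweep by a per-element binary search (same sorted list, same result).
-- Both Pythons sort arr IN PLACE; the equivalence proved here is about the return value.

-- ===== PORT A =====
-- the inner `while j < n and arr[j] <= 2*arr[i]: j += 1`
def pvAdvance (s : List Int) (n : Nat) (t : Int) (j : Nat) : Nat :=
  if j < n ∧ s.getD j 0 ≤ 2 * t then pvAdvance s n t (j + 1) else j
termination_by n - j
decreasing_by omega

-- one iteration of A's for-loop, state = (j, max_keep)
def pvStepA (s : List Int) (n : Nat) (st : Nat × Int) (i : Nat) : Nat × Int :=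
  let j := pvAdvance s n (s.getD i 0) st.1
  let length : Int := (j : Int) - (i : Int)
  let mk := max st.2 length
  let mk := if j < n then max mk (length + 1) else mk
  (j, mk)

def min_removals_with_one_edit (arr : List Int) : Int :=
  let s := PySem.List.sorted arr (fun x => x) false
  let n := s.length
  let st := (List.range n).foldl (pvStepA s n) (0, 0)
  (n : Int) - st.2

-- ===== PORT B =====
-- Source B's hand-written bisect_right loop: `while lo < hi: …`
def pvBisect (s : List Int) (x : Int) (lo hi : Nat) : Nat :=
  if lo < hi then
    let mid := (lo + hi) / 2
    if s.getD mid 0 ≤ x then pvBisect s x (mid + 1) hi else pvBisect s x lo mid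
  else lo
termination_by hi - lo
decreasing_by all_goals omega

-- one iteration of B's for-loop, state = max_keep
def pvStepB (s : List Int) (n : Nat) (mk : Int) (i : Nat) : Int :=
  let lo := pvBisect s (2 * s.getD i 0) 0 n
  let length : Int := (lo : Int) - (i : Int)
  let mk := max mk length
  if lo < n then max mk (length + 1) else mk

def min_removals_with_one_edit_alt (arr : List Int) : Int :=
  let s := PySem.List.sorted arr (fun x => x) false
  let n := s.length
  let mk := (List.range n).foldl (pvStepB s n) 0
  (n : Int) - mk

-- ===== PRECONDITION & SPEC =====
def Spec_min_removals_with_one_edit (arr : List Int) (out : Int) : Prop := out = min_removals_with_one_edit_alt arr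
instance (arr : List Int) (out : Int) : Decidable (Spec_min_removals_with_one_edit arr out) := by unfold Spec_min_removals_with_one_edit; infer_instance

-- ===== CLAIM (what is proved, stated in full; the proofs are below) =====
def Claim_equal_min_removals_with_one_edit : Prop := ∀ (arr : List Int), Dom_min_removals_with_one_edit arr → Spec_min_removals_with_one_edit arr (min_removals_with_one_edit arr)

-- ===== LEMMAS AND PROOFS =====

-- number of elements ≤ x (= bisect_right position in a sorted list)
def pvUb (s : List Int) (x : Int) : Nat := s.countP (fun a => decide (a ≤ x))

theorem pvUb_le_length (s : List Int) (x : Int) : pvUb s x ≤ s.length :=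
  List.countP_le_length

theorem pvUb_mono (s : List Int) {x y : Int} (h : x ≤ y) : pvUb s x ≤ pvUb s y := by
  unfold pvUb
  exact List.countP_mono_left (by intro a _ ha; simp at ha ⊢; omega)

-- on a sorted list, k < pvUb s x  ↔  s[k] ≤ x   (for k < length)
theorem pvUb_char (s : List Int) (hs : s.Pairwise (· ≤ ·)) (x : Int) (k : Nat)
    (hk : k < s.length) : k < pvUb s x ↔ s.getD k 0 ≤ x := by
  induction s generalizing k with
  | nil => simp at hk
  | cons a t ih =>
    have hat : ∀ b ∈ t, a ≤ b := (List.pairwise_cons.1 hs).1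
    have ht : t.Pairwise (· ≤ ·) := (List.pairwise_cons.1 hs).2
    by_cases hax : a ≤ x
    · have : pvUb (a :: t) x = pvUb t x + 1 := by
        unfold pvUb; simp [hax]
      rw [this]
      cases k with
      | zero => simpa using hax
      | succ k =>
        simp only [List.getD_cons_succ]
        have := ih ht k (by simpa using hk)
        omega
    · have h0 : pvUb (a :: t) x = 0 := by
        unfold pvUb
        rw [List.countP_eq_zero]
        intro b hb
        rcases List.mem_cons.1 hb with rfl | hb
        · simpa using hax
        · have := hat b hb; simp; omega
      rw [h0]
      constructor
      · omega
      · intro hle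
        exfalso
        cases k with
        | zero => simp at hle; omega
        | succ k =>
          simp only [List.getD_cons_succ] at hle
          have hkt : k < t.length := by simpa using hk
          have hm : t.getD k 0 ∈ t := by
            rw [List.getD_eq_getElem t 0 hkt]; exact List.getElem_mem hkt
          have := hat _ hm
          omega

theorem pvAdvance_eq (s : List Int) (hs : s.Pairwise (· ≤ ·)) (t : Int) (j : Nat)
    (hj : j ≤ pvUb s (2 * t)) : pvAdvance s s.length t j = pvUb s (2 * t) := by
  by_cases h : j < pvUb s (2 * t)
  · have hjl : j < s.length := lt_of_lt_of_le h (pvUb_le_length s _)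
    have hle : s.getD j 0 ≤ 2 * t := (pvUb_char s hs _ j hjl).1 h
    rw [pvAdvance, if_pos ⟨hjl, hle⟩]
    exact pvAdvance_eq s hs t (j + 1) (by omega)
  · have hje : j = pvUb s (2 * t) := by omega
    have hng : ¬ (j < s.length ∧ s.getD j 0 ≤ 2 * t) := by
      rintro ⟨h1, h2⟩
      exact h ((pvUb_char s hs _ j h1).2 h2)
    rw [pvAdvance, if_neg hng]
    exact hje
termination_by pvUb s (2 * t) - j
decreasing_by omega

theorem pvBisect_eq (s : List Int) (hs : s.Pairwise (· ≤ ·)) (x : Int) (lo hi : Nat)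
    (hlo : lo ≤ pvUb s x) (hhi : pvUb s x ≤ hi) (hn : hi ≤ s.length) :
    pvBisect s x lo hi = pvUb s x := by
  by_cases h : lo < hi
  · rw [pvBisect]
    simp only [h, if_true]
    set mid := (lo + hi) / 2 with hmid
    have hml : mid < s.length := by omega
    by_cases hc : s.getD mid 0 ≤ x
    · have : mid < pvUb s x := (pvUb_char s hs x mid hml).2 hc
      simp only [hc, if_true]
      exact pvBisect_eq s hs x (mid + 1) hi (by omega) hhi hn
    · have : ¬ (mid < pvUb s x) := fun hlt => hc ((pvUb_char s hs x mid hml).1 hlt)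
      simp only [hc, if_false]
      exact pvBisect_eq s hs x lo mid hlo (by omega) (by omega)
  · rw [pvBisect]
    simp only [h, if_false]
    omega
termination_by hi - lo
decreasing_by all_goals omega

-- consecutive elements of a sorted list are ordered
theorem sorted_getD_step (s : List Int) (hs : s.Pairwise (· ≤ ·)) (i : Nat)
    (h : i + 1 < s.length) : s.getD i 0 ≤ s.getD (i + 1) 0 := by
  rw [List.getD_eq_getElem s 0 (by omega), List.getD_eq_getElem s 0 h]
  exact List.pairwise_iff_getElem.1 hs i (i + 1) (by omega) h (by omega)

-- the two loops agree: A's fold carries (j, mk), B's fold carries mk;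
-- invariant: at entry to iteration i, A's j ≤ pvUb s (2*s[i]).
theorem fold_eq (s : List Int) (hs : s.Pairwise (· ≤ ·)) :
    ∀ (m i0 : Nat), i0 + m = s.length →
    ∀ (j : Nat) (mk : Int), (m = 0 ∨ j ≤ pvUb s (2 * s.getD i0 0)) →
    ((List.range' i0 m).foldl (pvStepA s s.length) (j, mk)).2 =
      (List.range' i0 m).foldl (pvStepB s s.length) mk := by
  intro m
  induction m with
  | zero => intro i0 _ j mk _; simp
  | succ m ih =>
    intro i0 hlen j mk hj
    have hj' : j ≤ pvUb s (2 * s.getD i0 0) := by rcases hj with h | h; omega; exact h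
    simp only [List.range'_succ, List.foldl_cons]
    have hadv : pvAdvance s s.length (s.getD i0 0) j = pvUb s (2 * s.getD i0 0) :=
      pvAdvance_eq s hs _ j hj'
    have hbis : pvBisect s (2 * s.getD i0 0) 0 s.length = pvUb s (2 * s.getD i0 0) :=
      pvBisect_eq s hs _ 0 s.length (by omega) (pvUb_le_length s _) (le_refl _)
    have hpair : pvStepA s s.length (j, mk) i0 =
        (pvUb s (2 * s.getD i0 0), pvStepB s s.length mk i0) := by
      simp only [pvStepA, pvStepB, hadv, hbis]
    rw [hpair]
    apply ih (i0 + 1) (by omega)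
    rcases Nat.eq_zero_or_pos m with hm | hm
    · left; exact hm
    · right
      exact pvUb_mono s (by have := sorted_getD_step s hs i0 (by omega); omega)

-- ===== VERDICT (by name: the statement is the Claim_ definition above) =====
theorem min_removals_with_one_edit_spec : Claim_equal_min_removals_with_one_edit := by
  intro arr _
  unfold Spec_min_removals_with_one_edit min_removals_with_one_edit min_removals_with_one_edit_alt
  have hs : (PySem.List.sorted arr (fun x => x) false).Pairwise (· ≤ ·) := by
    have := PySem.List.sorted_pairwise arr (fun x => x)
    simpa using this
  set s := PySem.List.sorted arr (fun x => x) false with hsdef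
  have h := fold_eq s hs s.length 0 (by omega) 0 0 ?_
  · simp only [← List.range_eq_range'] at h
    simp [h]
  · rcases Nat.eq_zero_or_pos s.length with h0 | h0
    · left; exact h0
    · right; omega
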